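-- pv_equiv track=rewrite | github.com/Tiburso/Trabalhos-IST | FP/IST Capitulo 6.1/IST 6.1.1.py | apenas_numeros_impares_teste
-- ===== SOURCE A (Python) =====
-- def apenas_numeros_impares_teste(num):
--     if num < 0 or not isinstance(num,int):
--         raise ValueError('argumento invalido')
--     total = ''
--     i = 0
--     while i < len(str(num)):
--         if int(str(num)[i]) % 2 != 0:
--             total += str(num)[i]
--         i += 1
--     return int(total)
-- ===== SOURCE B (Python) =====
-- def apenas_numeros_impares_teste(num):
--     if num < 0 or not isinstance(num, int):
--         raise ValueError('argumento invalido')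
--     total = ''
--     n = num
--     while n > 0:
--         n, d = divmod(n, 10)
--         if d % 2 != 0:
--             total = str(d) + total
--     return int(total)
-- ===== Notes on version B (the rewrite author's own statement) =====
-- stated objective: alternative
-- what changed: B extracts the digits arithmetically with repeated divmod(num, 10) from the least-significant end, prepending odd digits to the accumulator, instead of rebuilding str(num) and indexing into it on every loop iteration.
import Mathlib
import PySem

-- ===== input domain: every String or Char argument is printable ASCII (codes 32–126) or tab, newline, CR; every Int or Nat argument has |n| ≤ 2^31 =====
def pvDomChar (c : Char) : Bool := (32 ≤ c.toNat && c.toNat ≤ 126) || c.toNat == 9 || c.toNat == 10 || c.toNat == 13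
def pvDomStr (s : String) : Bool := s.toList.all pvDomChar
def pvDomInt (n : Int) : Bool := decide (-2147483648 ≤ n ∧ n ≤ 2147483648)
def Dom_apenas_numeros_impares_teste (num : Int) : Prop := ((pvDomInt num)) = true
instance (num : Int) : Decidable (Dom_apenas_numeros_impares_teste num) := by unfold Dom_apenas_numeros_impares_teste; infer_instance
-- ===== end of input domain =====

-- ===== PORT A =====
-- B extracts digits arithmetically with divmod instead of re-building str(num) and indexing it each
-- iteration; return-value equivalence on nonnegative inputs with at least one odd decimal digit
-- (elsewhere the Python A raises ValueError).

-- A's while loop over the characters of str(num), accumulating the odd-digit characters.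
def pvALoop : List Char → List Char → List Char
  | [], total => total
  | c :: rest, total =>
      if PySem.Int.mod ((PySem.Int.ofChars? [c]).getD 0) 2 ≠ 0 then
        pvALoop rest (total ++ [c])
      else
        pvALoop rest total

def apenas_numeros_impares_teste (num : Int) : Int :=
  if num < 0 then 0  -- Python raises ValueError here (excluded by Pre_)
  else (PySem.Int.ofChars? (pvALoop (PySem.Int.toChars num) [])).getD 0
  -- int('') (no odd digit) also raises ValueError in Python: excluded by Pre_

-- ===== PORT B =====
-- B's while loop: n, d = divmod(n, 10); prepend str(d) when d is odd.
def pvBLoop (n : Int) (acc : List Char) : List Char :=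
  if h : 0 < n then
    pvBLoop (PySem.Int.floordiv n 10)
      (if PySem.Int.mod (PySem.Int.mod n 10) 2 ≠ 0 then
         PySem.Int.toChars (PySem.Int.mod n 10) ++ acc
       else acc)
  else acc
termination_by n.toNat
decreasing_by
  have hn : n = (n.toNat : Int) := (Int.toNat_of_nonneg (le_of_lt h)).symm
  have h10 : PySem.Int.floordiv n 10 = ((n.toNat / 10 : Nat) : Int) := by
    rw [hn]; exact_mod_cast PySem.Int.floordiv_natCast n.toNat 10
  rw [h10]
  simp only [Int.toNat_natCast]
  exact Nat.div_lt_self (by omega) (by norm_num)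

def apenas_numeros_impares_teste_alt (num : Int) : Int :=
  if num < 0 then 0  -- Python raises ValueError here (excluded by Pre_)
  else (PySem.Int.ofChars? (pvBLoop num [])).getD 0

-- ===== PRECONDITION & SPEC =====
-- Pre_ excludes exactly the inputs where the Python A raises ValueError: negative numbers
-- (explicit raise) and numbers with no odd decimal digit (including 0), where int('') raises.
-- A decimal digit character is odd iff its character code is odd ('0' = 48).
def Pre_apenas_numeros_impares_teste (num : Int) : Prop :=
  0 ≤ num ∧ (PySem.Int.toChars num).any (fun c => c.toNat % 2 == 1) = true
instance (num : Int) : Decidable (Pre_apenas_numeros_impares_teste num) := by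
  unfold Pre_apenas_numeros_impares_teste; infer_instance

def pvWitness_apenas_numeros_impares_teste : Int := 13

def Spec_apenas_numeros_impares_teste (num : Int) (out : Int) : Prop := out = apenas_numeros_impares_teste_alt num
instance (num : Int) (out : Int) : Decidable (Spec_apenas_numeros_impares_teste num out) := by unfold Spec_apenas_numeros_impares_teste; infer_instance

-- ===== CLAIM (what is proved, stated in full; the proofs are below) =====
def Claim_equal_apenas_numeros_impares_teste : Prop := ∀ (num : Int), Dom_apenas_numeros_impares_teste num → Pre_apenas_numeros_impares_teste num → Spec_apenas_numeros_impares_teste num (apenas_numeros_impares_teste num)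

-- ===== LEMMAS AND PROOFS =====

-- the odd-digit-character test used by A's loop, as a Bool predicate
def pvOddC (c : Char) : Bool := decide (PySem.Int.mod ((PySem.Int.ofChars? [c]).getD 0) 2 ≠ 0)

lemma pvALoop_eq_filter (l : List Char) (total : List Char) :
    pvALoop l total = total ++ l.filter pvOddC := by
  induction l generalizing total with
  | nil => simp [pvALoop]
  | cons c rest ih =>
    by_cases h : PySem.Int.mod ((PySem.Int.ofChars? [c]).getD 0) 2 ≠ 0
    · rw [pvALoop, if_pos h, ih, List.filter_cons,
        show pvOddC c = true from decide_eq_true h]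
      simp
    · rw [pvALoop, if_neg h, ih, List.filter_cons,
        show pvOddC c = false from decide_eq_false h]
      simp

-- the sequence of decimal digit characters of a Nat, most significant first ([] for 0)
def pvG : Nat → List Char
  | 0 => []
  | m + 1 => pvG ((m + 1) / 10) ++ [Nat.digitChar ((m + 1) % 10)]
decreasing_by exact Nat.div_lt_self (Nat.succ_pos m) (by norm_num)

lemma pvG_pos (m : Nat) (hm : 0 < m) :
    pvG m = pvG (m / 10) ++ [Nat.digitChar (m % 10)] := by
  cases m with
  | zero => omega
  | succ k => rw [pvG]

lemma pvToDigitsCore_eq (f : Nat) : ∀ (m : Nat) (ds : List Char), 0 < m → m < f →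
    Nat.toDigitsCore 10 f m ds = pvG m ++ ds := by
  induction f with
  | zero => intro m ds h1 h2; omega
  | succ f ih =>
    intro m ds h1 h2
    rw [Nat.toDigitsCore]
    by_cases hq : m / 10 = 0
    · simp only [hq]
      rw [if_pos (by trivial)]
      rw [pvG_pos m h1, hq, pvG]
      simp
    · rw [if_neg hq]
      have hqpos : 0 < m / 10 := Nat.pos_of_ne_zero hq
      have hlt : m / 10 < f := by
        have := Nat.div_lt_self h1 (show 1 < 10 by norm_num)
        omega
      rw [ih (m / 10) (Nat.digitChar (m % 10) :: ds) hqpos hlt, pvG_pos m h1]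
      simp

lemma pvToDigits_eq_pvG (m : Nat) (hm : 0 < m) : Nat.toDigits 10 m = pvG m := by
  have := pvToDigitsCore_eq (m + 1) m [] hm (Nat.lt_succ_self m)
  simpa [Nat.toDigits] using this

lemma pvToDigits_single (k : Nat) (hk : k < 10) : Nat.toDigits 10 k = [Nat.digitChar k] := by
  simp [Nat.toDigits, Nat.toDigitsCore, Nat.div_eq_of_lt hk, Nat.mod_eq_of_lt hk]

-- parity of the character A tests equals parity of the digit B tests
lemma pvOddC_digitChar (r : Nat) (hr : r < 10) :
    pvOddC (Nat.digitChar r) = decide (PySem.Int.mod ((r : Int)) 2 ≠ 0) := by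
  interval_cases r <;> decide

lemma pvBLoop_eq_filter (m : Nat) : ∀ (acc : List Char),
    pvBLoop (m : Int) acc = (pvG m).filter pvOddC ++ acc := by
  induction m using Nat.strong_induction_on with
  | _ m ih =>
    intro acc
    rw [pvBLoop]
    by_cases hm : 0 < m
    · have hpos : (0 : Int) < (m : Int) := by exact_mod_cast hm
      rw [dif_pos hpos]
      have hdiv : PySem.Int.floordiv (m : Int) 10 = ((m / 10 : Nat) : Int) := by
        exact_mod_cast PySem.Int.floordiv_natCast m 10
      have hmod : PySem.Int.mod (m : Int) 10 = ((m % 10 : Nat) : Int) := by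
        exact_mod_cast PySem.Int.mod_natCast m 10
      have hrlt : m % 10 < 10 := Nat.mod_lt _ (by norm_num)
      have hchars : PySem.Int.toChars ((m % 10 : Nat) : Int) = [Nat.digitChar (m % 10)] := by
        have hnn : ¬ ((m % 10 : Nat) : Int) < 0 := not_lt.mpr (Int.natCast_nonneg _)
        simp only [PySem.Int.toChars]
        rw [if_neg hnn, Int.toNat_natCast]
        exact pvToDigits_single (m % 10) hrlt
      rw [hdiv, hmod, hchars]
      rw [ih (m / 10) (Nat.div_lt_self hm (by norm_num))]
      rw [pvG_pos m hm, List.filter_append]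
      by_cases hodd : PySem.Int.mod ((m % 10 : Nat) : Int) 2 ≠ 0
      · rw [if_pos hodd]
        have : pvOddC (Nat.digitChar (m % 10)) = true := by
          rw [pvOddC_digitChar (m % 10) hrlt]; simpa using hodd
        simp [this]
      · rw [if_neg hodd]
        have : pvOddC (Nat.digitChar (m % 10)) = false := by
          rw [pvOddC_digitChar (m % 10) hrlt]; simpa using hodd
        simp [this]
    · have hz : m = 0 := by omega
      subst hz
      rw [dif_neg (by norm_num)]
      simp [pvG]

lemma pv_chars_eq (num : Int) (h : 0 ≤ num) :
    pvALoop (PySem.Int.toChars num) [] = pvBLoop num [] := by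
  obtain ⟨m, rfl⟩ : ∃ m : Nat, num = (m : Int) := ⟨num.toNat, (Int.toNat_of_nonneg h).symm⟩
  rw [pvALoop_eq_filter, pvBLoop_eq_filter]
  cases Nat.eq_zero_or_pos m with
  | inl hz =>
    subst hz
    simp only [Nat.cast_zero, pvG, List.filter_nil, List.append_nil, List.nil_append]
    decide
  | inr hp =>
    have htc : PySem.Int.toChars ((m : Nat) : Int) = pvG m := by
      have hnn : ¬ ((m : Nat) : Int) < 0 := not_lt.mpr (Int.natCast_nonneg _)
      simp [PySem.Int.toChars, hnn, pvToDigits_eq_pvG m hp]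
    rw [htc]
    simp

-- ===== VERDICT (by name: the statement is the Claim_ definition above) =====
theorem apenas_numeros_impares_teste_spec : Claim_equal_apenas_numeros_impares_teste := by
  intro num _ hpre
  unfold Spec_apenas_numeros_impares_teste
  unfold apenas_numeros_impares_teste apenas_numeros_impares_teste_alt
  have h0 : ¬ num < 0 := not_lt.mpr hpre.1
  rw [if_neg h0, if_neg h0, pv_chars_eq num hpre.1]
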